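-- pv_equiv track=rewrite | github.com/Manjunishanth/Swift_visa | pdf_chunk_embeddings.py | chunk_text_charwise
-- ===== SOURCE A (Python) =====
-- from typing import List, Tuple
--
-- def chunk_text_charwise(text: str, chunk_size: int = 1000, overlap: int = 200) -> List[str]:
--     """Create overlapping character-based chunks from text."""
--     if chunk_size <= 0:
--         raise ValueError("chunk_size must be > 0")
--     if overlap >= chunk_size:
--         raise ValueError("overlap must be smaller than chunk_size")
--
--     chunks = []
--     start = 0
--     text_length = len(text)
--     while start < text_length:
--         end = min(start + chunk_size, text_length)
--         chunk = text[start:end]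
--         chunks.append(chunk)
--         if end == text_length:
--             break
--         start = end - overlap
--     return chunks
-- ===== SOURCE B (Python) =====
-- def chunk_text_charwise(text: str, chunk_size: int = 1000, overlap: int = 200):
--     """Create overlapping character-based chunks by peeling prefixes off the remaining text."""
--     if chunk_size <= 0:
--         raise ValueError("chunk_size must be > 0")
--     if overlap >= chunk_size:
--         raise ValueError("overlap must be smaller than chunk_size")
--     keep = chunk_size - overlap
--     chunks = []
--     rest = text
--     while len(rest) > chunk_size:
--         chunks.append(rest[:chunk_size])
--         rest = rest[keep:]
--     if rest:
--         chunks.append(rest)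
--     return chunks
-- ===== Notes on version B (the rewrite author's own statement) =====
-- stated objective: alternative
-- what changed: Replaces A's index-cursor loop (start/min/break, slicing by absolute positions) by structural consumption of the text: repeatedly peel the chunk_size-prefix off the remaining suffix and drop the first chunk_size-overlap characters, appending the nonempty remainder once after the loop; no indices, no min, no break.
import Mathlib
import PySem

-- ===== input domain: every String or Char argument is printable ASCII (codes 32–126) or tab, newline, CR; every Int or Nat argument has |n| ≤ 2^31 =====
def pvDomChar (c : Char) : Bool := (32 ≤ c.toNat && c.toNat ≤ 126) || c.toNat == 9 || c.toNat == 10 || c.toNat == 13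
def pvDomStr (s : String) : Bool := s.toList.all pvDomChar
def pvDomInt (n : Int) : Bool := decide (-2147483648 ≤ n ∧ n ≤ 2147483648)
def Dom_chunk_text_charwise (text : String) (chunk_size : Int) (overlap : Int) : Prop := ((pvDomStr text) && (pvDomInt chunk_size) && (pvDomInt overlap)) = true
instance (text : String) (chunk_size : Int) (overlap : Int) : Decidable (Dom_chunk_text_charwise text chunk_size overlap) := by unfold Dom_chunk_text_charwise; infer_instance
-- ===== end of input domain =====

-- B consumes the text structurally (peel prefix, drop the kept-overlap head, append the
-- remainder after the loop) instead of A's index cursor with min/break: alternative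
-- decomposition, not claimed faster.

-- ===== PORT A =====
-- A's while loop: state = (fuel, start, chunks); fuel only makes the recursion total.
def pvLoopA (chars : List Char) (chunk_size overlap : Int) :
    Nat → Int → List String → List String
  | 0, _, acc => acc
  | fuel + 1, start, acc =>
    let n : Int := chars.length
    if start < n then
      let e := min (start + chunk_size) n
      let chunk := String.ofList (PySem.List.slice chars (some start) (some e))
      let acc' := acc ++ [chunk]
      if e = n then acc' else pvLoopA chars chunk_size overlap fuel (e - overlap) acc'
    else acc

def chunk_text_charwise (text : String) (chunk_size : Int) (overlap : Int) : List String :=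
  if chunk_size ≤ 0 then []            -- Python: raise ValueError (excluded by Pre_)
  else if overlap ≥ chunk_size then [] -- Python: raise ValueError (excluded by Pre_)
  else
    let chars := text.toList
    pvLoopA chars chunk_size overlap (chars.length + 1) 0 []

-- ===== PORT B =====
-- B's while loop over the remaining suffix; the trailing 'if rest: append' of Source B is
-- the terminal branch. Fuel only makes the recursion total.
def pvLoopB (cs keep : Int) : Nat → List Char → List String → List String
  | 0, _, acc => acc
  | fuel + 1, rest, acc =>
    if cs < (rest.length : Int) then
      pvLoopB cs keep fuel (PySem.List.slice rest (some keep) none)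
        (acc ++ [String.ofList (PySem.List.slice rest none (some cs))])
    else if rest.isEmpty then acc else acc ++ [String.ofList rest]

def chunk_text_charwise_alt (text : String) (chunk_size : Int) (overlap : Int) : List String :=
  if chunk_size ≤ 0 then []            -- Python: raise ValueError (excluded by Pre_)
  else if overlap ≥ chunk_size then [] -- Python: raise ValueError (excluded by Pre_)
  else
    let chars := text.toList
    pvLoopB chunk_size (chunk_size - overlap) (chars.length + 1) chars []

-- ===== PRECONDITION & SPEC =====
-- Pre_ excludes exactly the inputs on which A raises ValueError (both guards).
def Pre_chunk_text_charwise (text : String) (chunk_size : Int) (overlap : Int) : Prop :=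
  0 < chunk_size ∧ overlap < chunk_size
instance (text : String) (chunk_size : Int) (overlap : Int) : Decidable (Pre_chunk_text_charwise text chunk_size overlap) := by unfold Pre_chunk_text_charwise; infer_instance
def pvWitness_chunk_text_charwise : String × Int × Int := ("abcdefgh", 3, 1)

def Spec_chunk_text_charwise (text : String) (chunk_size : Int) (overlap : Int) (out : List String) : Prop := out = chunk_text_charwise_alt text chunk_size overlap
instance (text : String) (chunk_size : Int) (overlap : Int) (out : List String) : Decidable (Spec_chunk_text_charwise text chunk_size overlap out) := by unfold Spec_chunk_text_charwise; infer_instance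

-- ===== CLAIM =====
def Claim_equal_chunk_text_charwise : Prop := ∀ (text : String) (chunk_size : Int) (overlap : Int), Dom_chunk_text_charwise text chunk_size overlap → Pre_chunk_text_charwise text chunk_size overlap → Spec_chunk_text_charwise text chunk_size overlap (chunk_text_charwise text chunk_size overlap)

-- ===== LEMMAS AND PROOFS =====

-- simulation: A's state 'start' corresponds to B's state 'chars.drop start.toNat'
lemma pvLoop_sim (chars : List Char) (cs ov : Int) (hcs : 0 < cs) (hov : ov < cs) :
    ∀ (fuel : Nat) (start : Int) (acc : List String), 0 ≤ start →
      pvLoopA chars cs ov fuel start acc =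
        pvLoopB cs (cs - ov) fuel (chars.drop start.toNat) acc := by
  intro fuel
  induction fuel with
  | zero => intro start acc _; rfl
  | succ k ih =>
    intro start acc hstart
    have hrlen : ((chars.drop start.toNat).length : Int) = max 0 ((chars.length : Int) - start) := by
      simp [List.length_drop]; omega
    simp only [pvLoopA, pvLoopB]
    by_cases h1 : start < (chars.length : Int)
    · rw [if_pos h1]
      by_cases h2 : cs < ((chars.drop start.toNat).length : Int)
      · -- loop body fires on both sides
        rw [if_pos h2]
        have he : min (start + cs) (chars.length : Int) = start + cs := by omega
        rw [if_neg (by omega)]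
        have hkeep : (0:Int) ≤ cs - ov := by omega
        have hchunk : PySem.List.slice chars (some start) (some (start + cs)) =
            PySem.List.slice (chars.drop start.toNat) none (some cs) := by
          rw [PySem.List.slice_toNat _ hstart (by omega), PySem.List.slice_to _ hcs.le]
          congr 1
          omega
        have hdrop : chars.drop (start + cs - ov).toNat =
            PySem.List.slice (chars.drop start.toNat) (some (cs - ov)) none := by
          rw [PySem.List.slice_from _ hkeep, List.drop_drop]
          congr 1
          omega
        rw [he, hchunk, ih (start + cs - ov) _ (by omega), hdrop]
      · -- final chunk: e = n, A appends and breaks; B exits the loop and appends rest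
        rw [if_neg h2]
        have hne : (chars.drop start.toNat) ≠ [] := by
          intro hnil
          rw [hnil] at hrlen
          simp at hrlen
          omega
        rw [if_neg (show ¬((chars.drop start.toNat).isEmpty = true) by
          simp only [List.isEmpty_iff]; exact hne)]
        have he : min (start + cs) (chars.length : Int) = (chars.length : Int) := by omega
        rw [he, if_pos rfl]
        congr 2
        rw [PySem.List.slice_toNat _ hstart (Int.natCast_nonneg _)]
        congr 1
        apply List.take_of_length_le
        simp only [List.length_drop]
        omega
    · -- start ≥ n: rest is empty, both return acc
      rw [if_neg h1]
      have hnil : chars.drop start.toNat = [] := by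
        rw [List.drop_eq_nil_iff]
        omega
      rw [hnil]
      rw [if_neg (by simp; omega), if_pos (by simp)]

-- ===== VERDICT =====
theorem chunk_text_charwise_spec : Claim_equal_chunk_text_charwise := by
  intro text cs ov _ hpre
  obtain ⟨hcs, hov⟩ := hpre
  unfold Spec_chunk_text_charwise chunk_text_charwise chunk_text_charwise_alt
  rw [if_neg (by omega), if_neg (by omega), if_neg (by omega), if_neg (by omega)]
  have h := pvLoop_sim text.toList cs ov hcs hov (text.toList.length + 1) 0 [] le_rfl
  simpa using h
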